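-- pv_equiv track=rewrite | github.com/lab-v2/pyreason | pyreason/scripts/utils/rule_parser.py | _parse_head_arguments
-- ===== SOURCE A (Python) =====
-- def _parse_head_arguments(head_args_str):
--     """
--     Parse head arguments which can be either simple variables or function calls.
--
--     Examples:
--         "X" -> head_variables=['X'], head_fns=[''], head_fns_vars=[[]]
--         "X, Y" -> head_variables=['X', 'Y'], head_fns=['', ''], head_fns_vars=[[], []]
--         "f(X, Y)" -> head_variables=['__temp_var_0'], head_fns=['f'], head_fns_vars=[['X', 'Y']]
--         "f(X, Y), Z" -> head_variables=['__temp_var_0', 'Z'], head_fns=['f', ''], head_fns_vars=[['X', 'Y'], []]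
--         "f(X, Y), g(A, B)" -> head_variables=['__temp_var_0', '__temp_var_1'], head_fns=['f', 'g'], head_fns_vars=[['X', 'Y'], ['A', 'B']]
--     """
--     head_variables = []
--     head_fns = []
--     head_fns_vars = []
--
--     if not head_args_str:
--         return head_variables, head_fns, head_fns_vars
--
--     # Split arguments by comma, being careful about nested parentheses
--     args_list = []
--     current_arg = ''
--     paren_count = 0
--
--     for char in head_args_str:
--         if char == '(':
--             paren_count += 1
--             current_arg += char
--         elif char == ')':
--             paren_count -= 1
--             current_arg += char
--         elif char == ',' and paren_count == 0:
--             args_list.append(current_arg.strip())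
--             current_arg = ''
--         else:
--             current_arg += char
--
--     # Add the last argument
--     if current_arg.strip():
--         args_list.append(current_arg.strip())
--
--     # Parse each argument
--     for arg in args_list:
--         arg = arg.strip()
--
--         # Check if it's a function call (contains '(' and ')')
--         if '(' in arg and ')' in arg:
--             # Extract function name and arguments
--             paren_idx = arg.find('(')
--             fn_name = arg[:paren_idx]
--
--             # Extract arguments inside the function
--             fn_args_str = arg[paren_idx + 1:arg.rfind(')')]
--             fn_args = [a.strip() for a in fn_args_str.split(',') if a.strip()]
--
--             # Create a temporary variable name for this function result
--             temp_var = f'__temp_var_{len(head_variables)}'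
--
--             head_variables.append(temp_var)
--             head_fns.append(fn_name)
--             head_fns_vars.append(fn_args)
--         else:
--             # It's a simple variable
--             head_variables.append(arg)
--             head_fns.append('')
--             head_fns_vars.append([])
--
--     return head_variables, head_fns, head_fns_vars
-- ===== SOURCE B (Python) =====
-- def _parse_head_arguments(head_args_str):
--     """Split-and-merge strategy: split the whole string on every comma at once,
--     then merge fragments back together while their joined text has unbalanced
--     parentheses; each balanced merged token is classified immediately via
--     str.partition/str.rpartition (no per-character scan, no depth counter)."""
--     head_variables = []
--     head_fns = []
--     head_fns_vars = []
--     if not head_args_str: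
--         return head_variables, head_fns, head_fns_vars
--
--     def emit(tok):
--         arg = tok.strip()
--         name, sep, rest = arg.partition('(')
--         if sep and ')' in arg:
--             inner = rest.rpartition(')')[0]
--             head_variables.append('__temp_var_%d' % len(head_variables))
--             head_fns.append(name)
--             head_fns_vars.append([a.strip() for a in inner.split(',') if a.strip()])
--         else:
--             head_variables.append(arg)
--             head_fns.append('')
--             head_fns_vars.append([])
--
--     fragments = head_args_str.split(',')
--     buf = []
--     for frag in fragments[:-1]:
--         buf.append(frag)
--         tok = ','.join(buf)
--         if tok.count('(') == tok.count(')'):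
--             emit(tok)
--             buf = []
--     last = ','.join(buf + [fragments[-1]])
--     if last.strip():
--         emit(last)
--     return head_variables, head_fns, head_fns_vars
-- ===== Notes on version B (the rewrite author's own statement) =====
-- stated objective: alternative
-- what changed: Replaced A's per-character scan with a running paren-depth counter by a split-and-merge algorithm: the string is split on ALL commas up front, fragments are re-merged while the merged text's '(' and ')' counts disagree, and each balanced token is classified with str.partition/str.rpartition instead of find/rfind index slicing.
import Mathlib
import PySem

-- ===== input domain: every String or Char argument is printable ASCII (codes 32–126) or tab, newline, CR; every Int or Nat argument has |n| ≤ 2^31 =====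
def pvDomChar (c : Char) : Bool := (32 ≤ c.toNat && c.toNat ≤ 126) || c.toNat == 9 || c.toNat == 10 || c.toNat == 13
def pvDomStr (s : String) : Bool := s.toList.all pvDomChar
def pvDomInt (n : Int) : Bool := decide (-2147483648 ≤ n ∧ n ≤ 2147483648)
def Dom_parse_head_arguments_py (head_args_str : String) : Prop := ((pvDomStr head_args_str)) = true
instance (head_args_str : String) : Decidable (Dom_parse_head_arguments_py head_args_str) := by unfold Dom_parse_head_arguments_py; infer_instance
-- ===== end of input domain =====

-- B replaces A's per-character scan with a depth counter by split-and-merge: split on ALL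
-- commas up front, re-merge fragments while the merged token's paren counts disagree, and
-- classify each balanced token with partition/rpartition (objective: alternative algorithm).

-- ===== PORT A =====
-- second loop's body: strip the arg, classify as function call or plain variable
def pvClassifyA (st : List String × List String × List (List String)) (arg0 : List Char) :
    List String × List String × List (List String) :=
  let arg := PySem.Chars.strip arg0
  if PySem.Chars.isIn ['('] arg && PySem.Chars.isIn [')'] arg then
    let paren_idx := PySem.Chars.find arg ['(']
    let fn_name := PySem.Chars.slice arg none (some paren_idx)
    let fn_args_str := PySem.Chars.slice arg (some (paren_idx + 1)) (some (PySem.Chars.rfind arg [')']))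
    let fn_args := ((PySem.Chars.splitOn fn_args_str [',']).filter
        (fun x => PySem.Chars.strip x != [])).map (fun x => String.ofList (PySem.Chars.strip x))
    let temp_var := String.ofList ("__temp_var_".toList ++ (PySem.Int.toStr (st.1.length : Int)).toList)
    (st.1 ++ [temp_var], st.2.1 ++ [String.ofList fn_name], st.2.2 ++ [fn_args])
  else
    (st.1 ++ [String.ofList arg], st.2.1 ++ [""], st.2.2 ++ [([] : List String)])

-- first loop: split on top-level commas, tracking paren depth
def pvSplitLoopA : List Char → List (List Char) → List Char → Int →
    List (List Char) × List Char × Int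
  | [], args, cur, pc => (args, cur, pc)
  | c :: rest, args, cur, pc =>
    if c = '(' then pvSplitLoopA rest args (cur ++ [c]) (pc + 1)
    else if c = ')' then pvSplitLoopA rest args (cur ++ [c]) (pc - 1)
    else if c = ',' ∧ pc = 0 then pvSplitLoopA rest (args ++ [PySem.Chars.strip cur]) [] pc
    else pvSplitLoopA rest args (cur ++ [c]) pc

def parse_head_arguments_py (head_args_str : String) :
    List String × List String × List (List String) :=
  if head_args_str = "" then ([], [], [])
  else
    let r := pvSplitLoopA head_args_str.toList [] [] 0
    let args_list := if PySem.Chars.strip r.2.1 != [] then r.1 ++ [PySem.Chars.strip r.2.1] else r.1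
    args_list.foldl pvClassifyA ([], [], [])

-- ===== PORT B =====
-- hand port of str.partition(c) (PySem has no partition): (before first c, found?, after first c)
def pvPartitionB (c : Char) : List Char → List Char × Bool × List Char
  | [] => ([], false, [])
  | a :: t =>
    if a = c then ([], true, t)
    else
      let r := pvPartitionB c t
      (a :: r.1, r.2.1, r.2.2)

-- hand port of str.rpartition(c)[0] (PySem has no rpartition): text before the LAST c, [] if absent
def pvRPartFstB (c : Char) : List Char → List Char
  | [] => []
  | a :: t => if c ∈ t then a :: pvRPartFstB c t else []

-- emit(tok): classify a balanced token via partition/rpartition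
def pvEmitB (st : List String × List String × List (List String)) (tok : List Char) :
    List String × List String × List (List String) :=
  let arg := PySem.Chars.strip tok
  let p := pvPartitionB '(' arg
  if p.2.1 && PySem.Chars.isIn [')'] arg then
    let inner := pvRPartFstB ')' p.2.2
    (st.1 ++ [String.ofList ("__temp_var_".toList ++ (PySem.Int.toStr (st.1.length : Int)).toList)],
     st.2.1 ++ [String.ofList p.1],
     st.2.2 ++ [((PySem.Chars.splitOn inner [',']).filter
        (fun a => PySem.Chars.strip a != [])).map (fun a => String.ofList (PySem.Chars.strip a))])
  else
    (st.1 ++ [String.ofList arg], st.2.1 ++ [""], st.2.2 ++ [([] : List String)])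

-- loop body over fragments[:-1]: merge the fragment into buf; emit when the counts balance
def pvLoopB (p : (List String × List String × List (List String)) × List (List Char))
    (frag : List Char) : (List String × List String × List (List String)) × List (List Char) :=
  let buf := p.2 ++ [frag]
  let tok := PySem.Chars.join [','] buf
  if PySem.Chars.count tok ['('] = PySem.Chars.count tok [')'] then (pvEmitB p.1 tok, [])
  else (p.1, buf)

def parse_head_arguments_py_alt (head_args_str : String) :
    List String × List String × List (List String) :=
  if head_args_str = "" then ([], [], [])
  else
    let fragments := PySem.Chars.splitOn head_args_str.toList [',']
    let q := fragments.dropLast.foldl pvLoopB (([], [], []), [])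
    let last := PySem.Chars.join [','] (q.2 ++ [fragments.getLastD []])
    if PySem.Chars.strip last != [] then pvEmitB q.1 last else q.1

-- ===== PRECONDITION & SPEC =====
def Spec_parse_head_arguments_py (head_args_str : String) (out : List String × List String × List (List String)) : Prop := out = parse_head_arguments_py_alt head_args_str
instance (head_args_str : String) (out : List String × List String × List (List String)) : Decidable (Spec_parse_head_arguments_py head_args_str out) := by unfold Spec_parse_head_arguments_py; infer_instance

-- ===== CLAIM (what is proved, stated in full; the proofs are below) =====
def Claim_equal_parse_head_arguments_py : Prop := ∀ (head_args_str : String), Dom_parse_head_arguments_py head_args_str → Spec_parse_head_arguments_py head_args_str (parse_head_arguments_py head_args_str)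

-- ===== LEMMAS AND PROOFS =====

-- strip is idempotent
lemma pvDropWhile_idem (p : Char → Bool) (l : List Char) :
    (l.dropWhile p).dropWhile p = l.dropWhile p := by
  induction l with
  | nil => rfl
  | cons a t ih => by_cases h : p a <;> simp [h, ih]

lemma pvDropWhile_prefix_fix (p : Char → Bool) (l m : List Char)
    (h : m <+: l.dropWhile p) : m.dropWhile p = m := by
  cases m with
  | nil => rfl
  | cons a t =>
    obtain ⟨s, hs⟩ := h
    have hpa : p a = false := by
      have := List.head?_dropWhile_not p l
      rw [← hs] at this
      simpa using this
    simp [hpa]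

lemma pvRstrip_idem (l : List Char) :
    PySem.Chars.rstrip (PySem.Chars.rstrip l) = PySem.Chars.rstrip l := by
  simp [PySem.Chars.rstrip, pvDropWhile_idem]

lemma pvLstrip_rstrip_lstrip (l : List Char) :
    PySem.Chars.lstrip (PySem.Chars.rstrip (PySem.Chars.lstrip l))
      = PySem.Chars.rstrip (PySem.Chars.lstrip l) := by
  unfold PySem.Chars.lstrip PySem.Chars.rstrip
  apply pvDropWhile_prefix_fix (l := l)
  have hsuf : (l.dropWhile PySem.Chars.isspace).reverse.dropWhile PySem.Chars.isspace
      <:+ (l.dropWhile PySem.Chars.isspace).reverse := List.dropWhile_suffix _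
  have := hsuf.reverse
  simpa using this

lemma pvStrip_idem (l : List Char) :
    PySem.Chars.strip (PySem.Chars.strip l) = PySem.Chars.strip l := by
  unfold PySem.Chars.strip
  rw [pvLstrip_rstrip_lstrip, pvRstrip_idem]

-- ---- partition / rpartition vs find / rfind ----

lemma pvPart_found (c : Char) (l : List Char) :
    (pvPartitionB c l).2.1 = true ↔ c ∈ l := by
  induction l with
  | nil => simp [pvPartitionB]
  | cons a t ih =>
    by_cases h : a = c
    · simp [pvPartitionB, h]
    · simp [pvPartitionB, h, ih, Ne.symm h]

lemma pvPart_name (c : Char) (l : List Char) (h : c ∈ l) :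
    (pvPartitionB c l).1 = l.take (l.idxOf c) := by
  induction l with
  | nil => simp at h
  | cons a t ih =>
    by_cases hac : a = c
    · simp [pvPartitionB, hac, List.idxOf_cons_self]
    · have hct : c ∈ t := by
        rcases List.mem_cons.mp h with h1 | h1
        · exact absurd h1.symm hac
        · exact h1
      have : (a :: t).idxOf c = t.idxOf c + 1 := by
        simp [List.idxOf_cons, hac]
      simp [pvPartitionB, hac, this, ih hct]

lemma pvPart_rest (c : Char) (l : List Char) (h : c ∈ l) :
    (pvPartitionB c l).2.2 = l.drop (l.idxOf c + 1) := by
  induction l with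
  | nil => simp at h
  | cons a t ih =>
    by_cases hac : a = c
    · simp [pvPartitionB, hac, List.idxOf_cons_self]
    · have hct : c ∈ t := by
        rcases List.mem_cons.mp h with h1 | h1
        · exact absurd h1.symm hac
        · exact h1
      have : (a :: t).idxOf c = t.idxOf c + 1 := by
        simp [List.idxOf_cons, hac]
      simp [pvPartitionB, hac, this, ih hct]

lemma pvSingleton_isPrefixOf (c : Char) (l : List Char) :
    [c].isPrefixOf l = true ↔ l[0]? = some c := by
  cases l with
  | nil => rw [List.isPrefixOf_iff_prefix]; simp
  | cons a t =>
    rw [List.isPrefixOf_iff_prefix, List.cons_prefix_cons]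
    simp [eq_comm]

lemma pvFind_go_singleton (c : Char) :
    ∀ (l : List Char) (k : Nat), PySem.Chars.find.go [c] l k
      = if c ∈ l then ((k + l.idxOf c : Nat) : Int) else -1 := by
  intro l
  induction l with
  | nil => intro k; simp [PySem.Chars.find.go]
  | cons a t ih =>
    intro k
    by_cases hac : a = c
    · have hp : [c].isPrefixOf (a :: t) = true := by
        rw [pvSingleton_isPrefixOf]; simp [hac]
      simp [PySem.Chars.find.go, hp, hac, List.idxOf_cons_self]
    · have hp : [c].isPrefixOf (a :: t) = false := by
        rw [Bool.eq_false_iff]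
        intro hcon
        exact hac (by simpa using (pvSingleton_isPrefixOf c (a :: t)).mp hcon)
      have hidx : (a :: t).idxOf c = t.idxOf c + 1 := by simp [List.idxOf_cons, hac]
      rw [PySem.Chars.find.go]
      simp only [hp]
      rw [ih (k + 1)]
      by_cases hm : c ∈ t
      · simp [hm, hidx, Ne.symm hac]
        omega
      · simp [hm, hidx, Ne.symm hac]

lemma pvFind_singleton (c : Char) (l : List Char) :
    PySem.Chars.find l [c] = if c ∈ l then ((l.idxOf c : Nat) : Int) else -1 := by
  have := pvFind_go_singleton c l 0
  simpa [PySem.Chars.find] using this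

lemma pvRPart_not_mem (c : Char) (l : List Char) (h : c ∉ l) : pvRPartFstB c l = [] := by
  induction l with
  | nil => rfl
  | cons a t ih =>
    have : c ∉ t := fun hm => h (List.mem_cons_of_mem _ hm)
    simp [pvRPartFstB, this]

lemma pvRPart_decomp (c : Char) (l : List Char) (h : c ∈ l) :
    ∃ s, l = pvRPartFstB c l ++ c :: s ∧ c ∉ s := by
  induction l with
  | nil => simp at h
  | cons a t ih =>
    by_cases hct : c ∈ t
    · obtain ⟨s, hs, hns⟩ := ih hct
      exact ⟨s, by simp [pvRPartFstB, hct]; exact hs, hns⟩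
    · have hac : a = c := by
        rcases List.mem_cons.mp h with h1 | h1
        · exact h1.symm
        · exact absurd h1 hct
      exact ⟨t, by simp [pvRPartFstB, hct, hac], hct⟩

lemma pvRPart_append_mem (c : Char) (l1 l2 : List Char) (h : c ∈ l2) :
    pvRPartFstB c (l1 ++ l2) = l1 ++ pvRPartFstB c l2 := by
  induction l1 with
  | nil => simp
  | cons a t ih =>
    have : c ∈ t ++ l2 := List.mem_append_right _ h
    simp [pvRPartFstB, this, ih]

lemma pvRPart_append_not_mem (c : Char) (l1 l2 : List Char) (h : c ∉ l2) :
    pvRPartFstB c (l1 ++ l2) = pvRPartFstB c l1 := by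
  induction l1 with
  | nil => simp [pvRPart_not_mem c l2 h, pvRPartFstB]
  | cons a t ih =>
    by_cases hct : c ∈ t
    · have : c ∈ t ++ l2 := List.mem_append_left _ hct
      simp [pvRPartFstB, this, hct, ih]
    · have hnot : c ∉ t ++ l2 := by
        intro hm
        rcases List.mem_append.mp hm with h1 | h1
        · exact hct h1
        · exact h h1
      simp [pvRPartFstB, hnot, hct]

lemma pvRPart_prefix (c : Char) (l : List Char) : pvRPartFstB c l <+: l := by
  induction l with
  | nil => simp [pvRPartFstB]
  | cons a t ih =>
    by_cases hct : c ∈ t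
    · simpa [pvRPartFstB, hct] using ih
    · simp [pvRPartFstB, hct]

lemma pvRfind_go_spec (c : Char) (l : List Char) :
    ∀ j : Nat, PySem.Chars.rfind.go l [c] j
      = if ∃ i, i ≤ j ∧ l[i]? = some c
        then ((Nat.findGreatest (fun i => l[i]? = some c) j : Nat) : Int) else -1 := by
  intro j
  induction j with
  | zero =>
    rw [PySem.Chars.rfind.go]
    by_cases h : l[0]? = some c
    · rw [if_pos ((pvSingleton_isPrefixOf c l).mpr h),
        if_pos ⟨0, Nat.le_refl 0, h⟩]
      simp
    · rw [if_neg (fun hh => h ((pvSingleton_isPrefixOf c l).mp hh)), if_neg]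
      rintro ⟨i, hi, hP⟩
      exact h (by simpa [Nat.le_zero.mp hi] using hP)
  | succ j ih =>
    rw [PySem.Chars.rfind.go]
    have hd : ([c].isPrefixOf (l.drop (j + 1)) = true) ↔ l[j + 1]? = some c := by
      rw [pvSingleton_isPrefixOf]
      simp
    by_cases h : l[j + 1]? = some c
    · rw [if_pos (hd.mpr h), if_pos ⟨j + 1, Nat.le_refl _, h⟩, Nat.findGreatest_succ, if_pos h]
    · rw [if_neg (fun hh => h (hd.mp hh)), ih]
      have hex : (∃ i, i ≤ j + 1 ∧ l[i]? = some c) ↔ (∃ i, i ≤ j ∧ l[i]? = some c) := by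
        constructor
        · rintro ⟨i, hi, hP⟩
          rcases Nat.lt_or_ge i (j + 1) with h1 | h1
          · exact ⟨i, by omega, hP⟩
          · have hij : i = j + 1 := by omega
            subst hij
            exact absurd hP h
        · rintro ⟨i, hi, hP⟩
          exact ⟨i, by omega, hP⟩
      rw [Nat.findGreatest_succ, if_neg h]
      simp only [hex]

lemma pvRfind_singleton_mem (c : Char) (l : List Char) (h : c ∈ l) :
    PySem.Chars.rfind l [c] = ((pvRPartFstB c l).length : Int) := by
  obtain ⟨s, hdec, hns⟩ := pvRPart_decomp c l h
  set p := pvRPartFstB c l with hp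
  have hPp : l[p.length]? = some c := by
    rw [hdec, List.getElem?_append_right (Nat.le_refl _)]
    simp
  have hlen : p.length ≤ l.length := by
    rw [hdec]
    simp
  rw [PySem.Chars.rfind, pvRfind_go_spec, if_pos ⟨p.length, hlen, hPp⟩]
  congr 1
  apply Nat.findGreatest_eq_iff.mpr
  refine ⟨hlen, fun _ => hPp, ?_⟩
  intro n hmn hnk hP
  rw [hdec, List.getElem?_append_right (by omega)] at hP
  have h1 : n - p.length = (n - p.length - 1) + 1 := by omega
  rw [h1, List.getElem?_cons_succ] at hP
  exact hns (List.mem_of_getElem? hP)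

-- emit = strip-then-classify
lemma pvEmitB_eq (st : List String × List String × List (List String)) (tok : List Char) :
    pvEmitB st tok = pvClassifyA st (PySem.Chars.strip tok) := by
  unfold pvEmitB pvClassifyA
  rw [pvStrip_idem]
  set arg := PySem.Chars.strip tok with harg
  by_cases h1 : '(' ∈ arg
  · by_cases h2 : ')' ∈ arg
    · have hp : (pvPartitionB '(' arg).2.1 = true := (pvPart_found _ _).mpr h1
      have hA1 : PySem.Chars.isIn ['('] arg = true := by
        rw [PySem.Chars.isIn_iff_infix]
        exact (List.singleton_infix_iff '(' arg).mpr h1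
      have hA2 : PySem.Chars.isIn [')'] arg = true := by
        rw [PySem.Chars.isIn_iff_infix]
        exact (List.singleton_infix_iff ')' arg).mpr h2
      have hfind : PySem.Chars.find arg ['('] = ((arg.idxOf '(' : Nat) : Int) := by
        rw [pvFind_singleton, if_pos h1]
      have hidxlt : arg.idxOf '(' < arg.length := List.idxOf_lt_length_of_mem h1
      have hname : (pvPartitionB '(' arg).1
          = PySem.Chars.slice arg none (some (PySem.Chars.find arg ['('])) := by
        rw [hfind, pvPart_name '(' arg h1]
        simp [PySem.List.slice_to_natCast]
      have hrest : (pvPartitionB '(' arg).2.2 = arg.drop (arg.idxOf '(' + 1) :=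
        pvPart_rest '(' arg h1
      have hinner : pvRPartFstB ')' (arg.drop (arg.idxOf '(' + 1))
          = PySem.Chars.slice arg (some (PySem.Chars.find arg ['('] + 1))
              (some (PySem.Chars.rfind arg [')'])) := by
        rw [hfind]
        have hsplit : arg.take (arg.idxOf '(' + 1) ++ arg.drop (arg.idxOf '(' + 1) = arg :=
          List.take_append_drop _ _
        have hlen_take : (arg.take (arg.idxOf '(' + 1)).length = arg.idxOf '(' + 1 := by
          rw [List.length_take]
          omega
        have hrf : PySem.Chars.rfind arg [')'] = ((pvRPartFstB ')' arg).length : Int) :=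
          pvRfind_singleton_mem ')' arg h2
        by_cases hr : ')' ∈ arg.drop (arg.idxOf '(' + 1)
        · have hmemapp := pvRPart_append_mem ')' (arg.take (arg.idxOf '(' + 1))
            (arg.drop (arg.idxOf '(' + 1)) hr
          rw [hsplit] at hmemapp
          rw [hrf, hmemapp, List.length_append, hlen_take]
          have hpre := pvRPart_prefix ')' (arg.drop (arg.idxOf '(' + 1))
          rw [show ((List.idxOf '(' arg : Nat) : Int) + 1
              = ((List.idxOf '(' arg + 1 : Nat) : Int) from by push_cast; ring]
          rw [PySem.Chars.slice_eq_listSlice, PySem.List.slice_natCast]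
          have hdle := hpre.length_le
          rw [List.prefix_iff_eq_take.mp hpre]
          congr 1
          simp only [List.length_take]
          omega
        · have hnotapp := pvRPart_append_not_mem ')' (arg.take (arg.idxOf '(' + 1))
            (arg.drop (arg.idxOf '(' + 1)) hr
          rw [hsplit] at hnotapp
          have hmem_take : ')' ∈ arg.take (arg.idxOf '(' + 1) := by
            have h2' : ')' ∈ arg.take (arg.idxOf '(' + 1) ++ arg.drop (arg.idxOf '(' + 1) := by
              rw [hsplit]
              exact h2
            rcases List.mem_append.mp h2' with hx | hx
            · exact hx
            · exact absurd hx hr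
          obtain ⟨s2, hdec2, _⟩ := pvRPart_decomp ')' (arg.take (arg.idxOf '(' + 1)) hmem_take
          have hlb : (pvRPartFstB ')' (arg.take (arg.idxOf '(' + 1))).length ≤ arg.idxOf '(' := by
            have hlc := congrArg List.length hdec2
            rw [hlen_take] at hlc
            simp at hlc
            omega
          rw [hrf, hnotapp, pvRPart_not_mem ')' _ hr]
          rw [show ((List.idxOf '(' arg : Nat) : Int) + 1
              = ((List.idxOf '(' arg + 1 : Nat) : Int) from by push_cast; ring]
          rw [PySem.Chars.slice_eq_listSlice, PySem.List.slice_natCast]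
          rw [show (pvRPartFstB ')' (List.take (List.idxOf '(' arg + 1) arg)).length
              - (List.idxOf '(' arg + 1) = 0 from by omega]
          simp
      simp only [hp, hA1, hA2, Bool.and_self, if_true, hname, hrest, hinner]
    · have hA2 : PySem.Chars.isIn [')'] arg = false := by
        rw [PySem.Chars.isIn_eq_false_iff]
        exact fun hin => h2 ((List.singleton_infix_iff ')' arg).mp hin)
      simp [hA2]
  · have hp : (pvPartitionB '(' arg).2.1 = false := by
      rw [Bool.eq_false_iff]
      exact fun hh => h1 ((pvPart_found _ _).mp hh)
    have hA1 : PySem.Chars.isIn ['('] arg = false := by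
      rw [PySem.Chars.isIn_eq_false_iff]
      exact fun hin => h1 ((List.singleton_infix_iff '(' arg).mp hin)
    simp [hp, hA1]

-- ---- balance / count ----

def pvBal (l : List Char) : Int := (l.count '(' : Int) - (l.count ')' : Int)

lemma pvBal_append (l1 l2 : List Char) : pvBal (l1 ++ l2) = pvBal l1 + pvBal l2 := by
  simp [pvBal, List.count_append]; ring

lemma pvCount_go_singleton (c : Char) :
    ∀ (fuel : Nat) (l : List Char) (acc : Nat), l.length ≤ fuel →
      PySem.Chars.count.go [c] fuel l acc = acc + l.count c := by
  intro fuel l acc h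
  induction l generalizing fuel acc with
  | nil => cases fuel <;> simp [PySem.Chars.count.go]
  | cons a t ih =>
    cases fuel with
    | zero => simp at h
    | succ f =>
      have hlen : t.length ≤ f := by simpa using h
      by_cases hac : a = c
      · rw [PySem.Chars.count.go,
          if_pos ((pvSingleton_isPrefixOf c (a :: t)).mpr (by simp [hac]))]
        simp only [List.length_cons, List.length_nil, Nat.zero_add, List.drop_succ_cons,
          List.drop_zero]
        rw [ih f (acc + 1) hlen]
        simp [List.count_cons, hac]
        omega
      · rw [PySem.Chars.count.go,
          if_neg (fun hh => hac (by simpa using (pvSingleton_isPrefixOf c (a :: t)).mp hh))]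
        rw [ih f acc hlen]
        simp [List.count_cons, hac]

lemma pvCount_singleton (c : Char) (l : List Char) :
    PySem.Chars.count l [c] = l.count c := by
  rw [PySem.Chars.count]
  rw [if_neg (by simp)]
  rw [pvCount_go_singleton c l.length l 0 (Nat.le_refl _)]
  simp

-- ---- split on ',' ----

-- proof-side recursive splitter: (first fragment, remaining fragments)
def pvSplit1 (c : Char) : List Char → List Char × List (List Char)
  | [] => ([], [])
  | a :: t =>
    let r := pvSplit1 c t
    if a = c then ([], r.1 :: r.2) else (a :: r.1, r.2)

lemma pvSplit1_reconstruct (c : Char) (l : List Char) :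
    l = (pvSplit1 c l).1 ++ (pvSplit1 c l).2.flatMap (fun g => c :: g) := by
  induction l with
  | nil => rfl
  | cons a t ih =>
    by_cases hac : a = c
    · simp [pvSplit1, hac]
      conv_lhs => rw [ih]
    · simp [pvSplit1, hac]
      conv_lhs => rw [ih]

lemma pvSplit1_free_head (c : Char) (l : List Char) : c ∉ (pvSplit1 c l).1 := by
  induction l with
  | nil => simp [pvSplit1]
  | cons a t ih =>
    by_cases hac : a = c
    · simp [pvSplit1, hac]
    · simp [pvSplit1, hac, ih, Ne.symm hac]

lemma pvSplit1_free_tail (c : Char) (l : List Char) :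
    ∀ g ∈ (pvSplit1 c l).2, c ∉ g := by
  induction l with
  | nil => simp [pvSplit1]
  | cons a t ih =>
    by_cases hac : a = c
    · intro g hg
      simp [pvSplit1, hac] at hg
      rcases hg with hg | hg
      · subst hg; exact pvSplit1_free_head c t
      · exact ih g hg
    · intro g hg
      simp [pvSplit1, hac] at hg
      exact ih g hg

lemma pvSplitOn_go_eq (l : List Char) :
    ∀ (fuel : Nat) (cur : List Char) (acc : List (List Char)), l.length < fuel →
      PySem.Chars.splitOn.go [','] fuel l cur acc
        = acc.reverse ++ ((cur.reverse ++ (pvSplit1 ',' l).1) :: (pvSplit1 ',' l).2) := by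
  induction l with
  | nil =>
    intro fuel cur acc h
    cases fuel with
    | zero => omega
    | succ f => simp [PySem.Chars.splitOn.go, pvSplit1]
  | cons a t ih =>
    intro fuel cur acc h
    cases fuel with
    | zero => omega
    | succ f =>
      have hlt : t.length < f := by simpa using h
      by_cases hac : a = ','
      · rw [PySem.Chars.splitOn.go,
          if_pos ((pvSingleton_isPrefixOf ',' (a :: t)).mpr (by simp [hac]))]
        simp only [List.length_cons, List.length_nil, Nat.zero_add, List.drop_succ_cons,
          List.drop_zero]
        rw [ih f [] (cur.reverse :: acc) hlt]
        simp [pvSplit1, hac]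
      · rw [PySem.Chars.splitOn.go,
          if_neg (fun hh => hac (by simpa using (pvSingleton_isPrefixOf ',' (a :: t)).mp hh))]
        rw [ih f (a :: cur) acc hlt]
        simp [pvSplit1, hac]

lemma pvSplitOn_comma (l : List Char) :
    PySem.Chars.splitOn l [','] = (pvSplit1 ',' l).1 :: (pvSplit1 ',' l).2 := by
  rw [PySem.Chars.splitOn, pvSplitOn_go_eq l (l.length + 1) [] [] (by omega)]
  simp

-- ---- the joined buffer ----

-- A's current_arg at a fragment boundary: the pending fragments joined, plus the consumed comma
def pvJB (buf : List (List Char)) : List Char :=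
  if buf = [] then [] else List.intercalate [','] buf ++ [',']

lemma pvInterc (bs : List (List Char)) (b : List Char) :
    List.intercalate [','] (b :: bs) = b ++ bs.flatMap (fun g => ',' :: g) := by
  induction bs generalizing b with
  | nil => simp [List.intercalate, List.intersperse]
  | cons x xs ih =>
    have hx := ih x
    rw [List.intercalate] at hx ⊢
    rw [show List.intersperse [','] (b :: x :: xs)
        = b :: [','] :: List.intersperse [','] (x :: xs) from rfl]
    simp [hx]

lemma pvJB_append (buf : List (List Char)) (f : List Char) :
    pvJB buf ++ f = List.intercalate [','] (buf ++ [f]) := by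
  by_cases hb : buf = []
  · subst hb
    simp [pvJB, List.intercalate, List.intersperse]
  · obtain ⟨b, bs, rfl⟩ := List.exists_cons_of_ne_nil hb
    rw [pvJB, if_neg hb]
    rw [pvInterc, List.cons_append, pvInterc, List.flatMap_append]
    simp

-- A's scan over a comma-free fragment just appends it and shifts the depth by its balance
lemma pvScan_nocomma (l : List Char) (h : ',' ∉ l) :
    ∀ (args : List (List Char)) (cur : List Char) (pc : Int),
      pvSplitLoopA l args cur pc = (args, cur ++ l, pc + pvBal l) := by
  induction l with
  | nil => intro args cur pc; simp [pvSplitLoopA, pvBal]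
  | cons a t ih =>
    have hat : ',' ∉ t := fun hm => h (List.mem_cons_of_mem _ hm)
    have hane : a ≠ ',' := fun he => h (he ▸ List.mem_cons_self)
    intro args cur pc
    by_cases h1 : a = '('
    · rw [pvSplitLoopA, if_pos h1, ih hat]
      simp [pvBal, h1, List.count_cons]
      ring
    · by_cases h2 : a = ')'
      · rw [pvSplitLoopA, if_neg h1, if_pos h2, ih hat]
        simp [pvBal, h2, List.count_cons, h1]
        ring
      · rw [pvSplitLoopA, if_neg h1, if_neg h2,
          if_neg (by intro hc; exact hane hc.1), ih hat]
        simp [pvBal, List.count_cons, h1, h2, hane]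

lemma pvScan_append (l1 l2 : List Char) :
    ∀ (args : List (List Char)) (cur : List Char) (pc : Int),
      pvSplitLoopA (l1 ++ l2) args cur pc
        = pvSplitLoopA l2 (pvSplitLoopA l1 args cur pc).1
            (pvSplitLoopA l1 args cur pc).2.1 (pvSplitLoopA l1 args cur pc).2.2 := by
  induction l1 with
  | nil => intro args cur pc; rfl
  | cons a t ih =>
    intro args cur pc
    by_cases h1 : a = '('
    · simp only [List.cons_append, pvSplitLoopA, if_pos h1]; exact ih _ _ _
    · by_cases h2 : a = ')'
      · simp only [List.cons_append, pvSplitLoopA, if_neg h1, if_pos h2]; exact ih _ _ _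
      · by_cases h3 : a = ',' ∧ pc = 0
        · simp only [List.cons_append, pvSplitLoopA, if_neg h1, if_neg h2, if_pos h3]
          exact ih _ _ _
        · simp only [List.cons_append, pvSplitLoopA, if_neg h1, if_neg h2, if_neg h3]
          exact ih _ _ _

lemma pvCond (tokL : List Char) :
    (PySem.Chars.count tokL ['('] = PySem.Chars.count tokL [')']) ↔ pvBal tokL = 0 := by
  rw [pvCount_singleton, pvCount_singleton, pvBal]
  omega

-- main correspondence: A's scan+classify over the remaining fragments equals B's merge loop
lemma pvMain : ∀ (fs : List (List Char)) (f : List Char)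
    (args : List (List Char)) (buf : List (List Char)),
    (',' ∉ f) → (∀ g ∈ fs, ',' ∉ g) →
    (let r := pvSplitLoopA (f ++ fs.flatMap (fun g => ',' :: g)) args (pvJB buf) (pvBal (pvJB buf));
     (if PySem.Chars.strip r.2.1 != [] then r.1 ++ [PySem.Chars.strip r.2.1] else r.1).foldl
        pvClassifyA ([], [], []))
    =
    (let q := ((f :: fs).dropLast).foldl pvLoopB (args.foldl pvClassifyA ([], [], []), buf);
     let last := PySem.Chars.join [','] (q.2 ++ [(f :: fs).getLastD []]);
     if PySem.Chars.strip last != [] then pvEmitB q.1 last else q.1) := by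
  intro fs
  induction fs with
  | nil =>
    intro f args buf hf _
    dsimp only
    rw [List.flatMap_nil, List.append_nil, pvScan_nocomma f hf]
    rw [show ([f] : List (List Char)).dropLast = [] from rfl]
    simp only [List.foldl_nil, List.getLastD_cons, List.getLastD_nil, PySem.Chars.join]
    rw [show List.intercalate [','] (buf ++ [f]) = pvJB buf ++ f from (pvJB_append buf f).symm]
    by_cases hc : PySem.Chars.strip (pvJB buf ++ f) = []
    · simp [hc]
    · simp [hc, List.foldl_append, pvEmitB_eq]
  | cons g gs ih =>
    intro f args buf hf hgs
    have hg : ',' ∉ g := hgs g List.mem_cons_self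
    have hgs' : ∀ x ∈ gs, ',' ∉ x := fun x hx => hgs x (List.mem_cons_of_mem _ hx)
    dsimp only
    rw [List.flatMap_cons, List.cons_append,
      pvScan_append f (',' :: (g ++ List.flatMap (fun g => ',' :: g) gs)),
      pvScan_nocomma f hf]
    dsimp only
    rw [show pvBal (pvJB buf) + pvBal f = pvBal (pvJB buf ++ f) from (pvBal_append _ _).symm]
    rw [pvSplitLoopA, if_neg (by decide : ¬ (',' = '(')), if_neg (by decide : ¬ (',' = ')'))]
    by_cases hb : pvBal (pvJB buf ++ f) = 0
    · rw [if_pos (show (',' = ',') ∧ pvBal (pvJB buf ++ f) = 0 from ⟨rfl, hb⟩)]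
      have ihh := ih g (args ++ [PySem.Chars.strip (pvJB buf ++ f)]) [] hg hgs'
      dsimp only at ihh
      have hjb : pvJB ([] : List (List Char)) = [] := by simp [pvJB]
      rw [hjb] at ihh
      have hbal0 : pvBal ([] : List Char) = 0 := by simp [pvBal]
      rw [hbal0] at ihh
      rw [hb, ihh]
      simp only [List.dropLast_cons₂, List.foldl_cons, pvLoopB, PySem.Chars.join]
      rw [show List.intercalate [','] (buf ++ [f]) = pvJB buf ++ f from (pvJB_append buf f).symm]
      rw [if_pos ((pvCond _).mpr hb)]
      rw [show pvEmitB (List.foldl pvClassifyA ([], [], []) args) (pvJB buf ++ f)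
          = pvClassifyA (List.foldl pvClassifyA ([], [], []) args)
              (PySem.Chars.strip (pvJB buf ++ f)) from pvEmitB_eq _ _]
      simp [List.foldl_append]
    · rw [if_neg (show ¬((',' = ',') ∧ pvBal (pvJB buf ++ f) = 0) from fun hcc => hb hcc.2)]
      have hcur : pvJB (buf ++ [f]) = (pvJB buf ++ f) ++ [','] := by
        rw [pvJB, if_neg (by simp), ← pvJB_append]
      have hbal : pvBal (pvJB (buf ++ [f])) = pvBal (pvJB buf ++ f) := by
        rw [hcur, pvBal_append]
        simp [pvBal]
      have ihh := ih g args (buf ++ [f]) hg hgs'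
      dsimp only at ihh
      rw [hbal, hcur] at ihh
      rw [ihh]
      simp only [List.dropLast_cons₂, List.foldl_cons, pvLoopB, PySem.Chars.join]
      rw [show List.intercalate [','] (buf ++ [f]) = pvJB buf ++ f from (pvJB_append buf f).symm]
      rw [if_neg (fun hcc => hb ((pvCond _).mp hcc))]
      simp [List.getLastD_cons]

-- ===== VERDICT (by name: the statement is the Claim_ definition above) =====
theorem parse_head_arguments_py_spec : Claim_equal_parse_head_arguments_py := by
  intro s _
  unfold Spec_parse_head_arguments_py parse_head_arguments_py parse_head_arguments_py_alt
  by_cases hs : s = ""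
  · simp [hs]
  · simp only [hs, if_false]
    have h := pvMain (pvSplit1 ',' s.toList).2 (pvSplit1 ',' s.toList).1 [] []
      (pvSplit1_free_head ',' s.toList) (pvSplit1_free_tail ',' s.toList)
    dsimp only at h
    rw [← pvSplit1_reconstruct ',' s.toList] at h
    have hjb : pvJB ([] : List (List Char)) = [] := by simp [pvJB]
    rw [hjb] at h
    have hbal0 : pvBal ([] : List Char) = 0 := by simp [pvBal]
    rw [hbal0] at h
    simp only [List.foldl_nil] at h
    rw [pvSplitOn_comma s.toList]
    exact h
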